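-- pv_equiv track=rewrite | github.com/VishnuprakashSelvarajan/DailyCoding | TwoSum.py | add_subtract
-- ===== SOURCE A (Python) =====
-- def add_subtract(num_list):
--     if len(num_list) <= 1:
--         return num_list[0]
--     output = num_list[0]
--     addition = 1
--     for i in range(1, len(num_list)):
--         if addition:
--             output += num_list[i]
--             addition = 0
--         else:
--             output -= num_list[i]
--             addition = 1
--
--     return output
-- ===== SOURCE B (Python) =====
-- def add_subtract(num_list):
--     if len(num_list) <= 1:
--         return num_list[0]
--     return num_list[0] + sum(num_list[1::2]) - sum(num_list[2::2])
-- ===== Notes on version B (the rewrite author's own statement) =====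
-- stated objective: simpler
-- what changed: Replaces the stateful toggled-accumulator loop with a closed parity-partitioned expression: first element plus the sum of the odd-index slice minus the sum of the even-index slice (from index 2).
import Mathlib
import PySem

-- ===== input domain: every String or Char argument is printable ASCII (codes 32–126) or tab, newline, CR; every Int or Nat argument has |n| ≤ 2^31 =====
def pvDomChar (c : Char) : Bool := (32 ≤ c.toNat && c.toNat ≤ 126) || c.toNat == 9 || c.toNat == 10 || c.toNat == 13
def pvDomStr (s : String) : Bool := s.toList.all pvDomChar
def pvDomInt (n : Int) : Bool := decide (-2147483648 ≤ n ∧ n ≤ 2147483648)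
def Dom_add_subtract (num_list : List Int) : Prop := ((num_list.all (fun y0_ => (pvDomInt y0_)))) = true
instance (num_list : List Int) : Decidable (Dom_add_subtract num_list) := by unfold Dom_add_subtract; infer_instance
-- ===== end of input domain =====

-- B replaces A's toggled-accumulator loop with a closed parity-partitioned expression
-- (first element + sum of the odd-index slice − sum of the even-index slice from 2); objective: simpler.

-- ===== PORT A =====
def add_subtract (num_list : List Int) : Int :=
  if num_list.length ≤ 1 then (PySem.List.pyGet? num_list 0).getD 0
  else
    ((PySem.List.pyRange 1 (num_list.length : Int) 1).foldl
      (fun (s : Int × Int) (i : Int) =>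
        if s.2 ≠ 0 then (s.1 + PySem.List.pyGetD num_list i 0, (0 : Int))
        else (s.1 - PySem.List.pyGetD num_list i 0, (1 : Int)))
      ((PySem.List.pyGet? num_list 0).getD 0, 1)).1

-- ===== PORT B =====
def add_subtract_alt (num_list : List Int) : Int :=
  if num_list.length ≤ 1 then (PySem.List.pyGet? num_list 0).getD 0
  else
    (PySem.List.pyGet? num_list 0).getD 0
      + ((PySem.List.slice? num_list (some 1) none 2).getD []).sum
      - ((PySem.List.slice? num_list (some 2) none 2).getD []).sum

-- ===== PRECONDITION & SPEC =====
-- Pre_ excludes only the empty list, on which Python A (and B) raise IndexError at the first-element access.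
def Pre_add_subtract (num_list : List Int) : Prop := num_list ≠ []
instance (num_list : List Int) : Decidable (Pre_add_subtract num_list) := by
  unfold Pre_add_subtract; infer_instance
def pvWitness_add_subtract : List Int := [3, -1, 4]

def Spec_add_subtract (num_list : List Int) (out : Int) : Prop := out = add_subtract_alt num_list
instance (num_list : List Int) (out : Int) : Decidable (Spec_add_subtract num_list out) := by
  unfold Spec_add_subtract; infer_instance

-- ===== CLAIM (what is proved, stated in full; the proofs are below) =====
def Claim_equal_add_subtract : Prop := ∀ (num_list : List Int), Dom_add_subtract num_list → Pre_add_subtract num_list → Spec_add_subtract num_list (add_subtract num_list)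

-- ===== LEMMAS AND PROOFS =====

-- elements at even positions 0, 2, 4, … of a list
def pvEvens : List Int → List Int
  | [] => []
  | [a] => [a]
  | a :: _ :: t => a :: pvEvens t

lemma pvEvens_cons (a : Int) (t : List Int) : pvEvens (a :: t) = a :: pvEvens t.tail := by
  cases t <;> simp [pvEvens]

lemma pvEvens_length (m : List Int) : (pvEvens m).length = (m.length + 1) / 2 := by
  induction m using pvEvens.induct with
  | case1 => simp [pvEvens]
  | case2 a => simp [pvEvens]
  | case3 a b t ih => simp [pvEvens, ih]; omega

lemma pvEvens_getElem (m : List Int) (k : Nat) (h : k < (pvEvens m).length)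
    (h2 : 2 * k < m.length) : (pvEvens m)[k] = m[2 * k] := by
  induction m using pvEvens.induct generalizing k with
  | case1 => simp [pvEvens] at h
  | case2 a =>
      have hk : k = 0 := by simp at h2; omega
      subst hk; simp [pvEvens]
  | case3 a b t ih =>
      cases k with
      | zero => simp [pvEvens]
      | succ k' =>
          have hh : k' < (pvEvens t).length := by simp [pvEvens] at h; omega
          have hh2 : 2 * k' < t.length := by simp at h2; omega
          have h3 : 2 * (k' + 1) = 2 * k' + 1 + 1 := by ring
          simp only [pvEvens, List.getElem_cons_succ, h3]
          exact ih k' hh hh2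

-- a [a::2] slice (a ≥ 0, step 2) is pvEvens of the a-dropped list
lemma pvSlice2 (xs : List Int) (a : Nat) :
    PySem.List.slice? xs (some (a : Int)) none 2 = some (pvEvens (xs.drop a)) := by
  have h2 : ¬ ((2:Int) < 0) := by norm_num
  have ha : ¬ ((a:Int) < 0) := by simp
  simp only [PySem.List.slice?, PySem.List.sliceIndices, if_neg h2, if_neg ha]
  norm_num
  by_cases hle : xs.length ≤ a
  · have hmin : min (a:Int) (xs.length:Int) = (xs.length:Int) := by
      simp; exact_mod_cast hle
    rw [hmin, List.drop_eq_nil_of_le hle]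
    simp [pvEvens]
  · have hlt : a < xs.length := by omega
    have hmin : min (a:Int) (xs.length:Int) = (a:Int) := by
      simp; omega
    rw [hmin]
    have hcount : ((xs.length:Int) - a + 2 - 1) / 2 = (((xs.length - a + 1)/2 : Nat) : Int) := by
      have h4 : (xs.length:Int) - a + 2 - 1 = ((xs.length - a + 1 : Nat) : Int) := by omega
      rw [h4]
      exact_mod_cast (Int.natCast_ediv (xs.length - a + 1) 2).symm
    rw [if_pos hlt, hcount]
    rw [Int.toNat_natCast]
    set c := (xs.length - a + 1) / 2 with hc
    have hmap : List.filterMap (fun k => xs[((a:Int) + 2 * (k:Nat)).toNat]?) (List.range c)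
        = (List.range c).map (fun k => xs.getD (a + 2 * k) 0) := by
      have hcong : ∀ k ∈ List.range c,
          xs[((a:Int) + 2 * (k:Nat)).toNat]? = some (xs.getD (a + 2 * k) 0) := by
        intro k hk
        have hk' : k < c := List.mem_range.mp hk
        have hidx : a + 2 * k < xs.length := by omega
        have hto : ((a:Int) + 2 * (k:Nat)).toNat = a + 2 * k := by omega
        rw [hto, List.getElem?_eq_getElem hidx, List.getD_eq_getElem xs 0 hidx]
      rw [List.filterMap_congr hcong]
      exact List.filterMap_eq_map_iff_forall_eq_some.mpr fun x => congrFun rfl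
    rw [hmap]
    apply List.ext_getElem
    · simp [pvEvens_length, hc]
    · intro i h1 hE
      simp only [List.getElem_map, List.getElem_range]
      have hiC : i < c := by simpa using h1
      have hidx : a + 2 * i < xs.length := by omega
      rw [pvEvens_getElem _ i hE (by simp; omega)]
      rw [List.getElem_drop]
      rw [List.getD_eq_getElem xs 0 hidx]

-- the toggled loop of A computes the alternating parity-sum
lemma pvFoldToggle (ys : List Int) : ∀ o : Int,
    ((ys.foldl (fun (s : Int × Int) (v : Int) =>
        if s.2 ≠ 0 then (s.1 + v, (0 : Int)) else (s.1 - v, (1 : Int))) (o, 1)).1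
      = o + (pvEvens ys).sum - (pvEvens ys.tail).sum)
    ∧ ((ys.foldl (fun (s : Int × Int) (v : Int) =>
        if s.2 ≠ 0 then (s.1 + v, (0 : Int)) else (s.1 - v, (1 : Int))) (o, 0)).1
      = o - (pvEvens ys).sum + (pvEvens ys.tail).sum) := by
  induction ys with
  | nil => intro o; simp [pvEvens]
  | cons y t ih =>
      intro o
      constructor
      · rw [List.foldl_cons, if_pos (show ((o, (1:Int)).2 ≠ 0) from by norm_num),
          show (((o, (1:Int)).1 + y, (0:Int)) : Int × Int) = (o + y, 0) from rfl,
          (ih (o + y)).2, pvEvens_cons y t]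
        simp only [List.tail_cons, List.sum_cons]
        ring
      · rw [List.foldl_cons, if_neg (show ¬((o, (0:Int)).2 ≠ 0) from by norm_num),
          show (((o, (0:Int)).1 - y, (1:Int)) : Int × Int) = (o - y, 1) from rfl,
          (ih (o - y)).1, pvEvens_cons y t]
        simp only [List.tail_cons, List.sum_cons]
        ring

-- ===== VERDICT (by name: the statement is the Claim_ definition above) =====
theorem add_subtract_spec : Claim_equal_add_subtract := by
  intro l _ hpre
  unfold Spec_add_subtract add_subtract add_subtract_alt
  by_cases h : l.length ≤ 1
  · simp [h]
  · simp only [h, if_false]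
    have s1 := pvSlice2 l 1
    have s2 := pvSlice2 l 2
    simp only [Nat.cast_one, Nat.cast_ofNat] at s1 s2
    rw [s1, s2]
    simp only [Option.getD_some]
    have hfold := PySem.List.foldl_pyRange_pyGetD' l 0
      (fun (s : Int × Int) (v : Int) =>
        if s.2 ≠ 0 then (s.1 + v, (0:Int)) else (s.1 - v, (1:Int)))
      ((PySem.List.pyGet? l 0).getD 0, 1) (show (0:Int) ≤ 1 by norm_num)
    rw [hfold]
    cases l with
    | nil => exact absurd rfl hpre
    | cons x rest =>
        simp only [Int.toNat_one, List.drop_succ_cons, List.drop_zero, List.drop_one]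
        exact (pvFoldToggle rest _).1
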